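-- pv_equiv track=rewrite | github.com/nxh584/ai-pm-toolkit | mcp-server/src/ai_pm_toolkit_mcp/tools/list_toolkit.py | _first_non_heading_paragraph
-- ===== SOURCE A (Python) =====
-- def _normalise_line(text: str) -> str:
--     compact = " ".join(text.split())
--     return compact.rstrip(".") + "." if compact else ""
--
-- def _first_non_heading_paragraph(content: str) -> str:
--     lines: list[str] = []
--     for raw in content.splitlines():
--         line = raw.strip()
--         if not line:
--             if lines:
--                 break
--             continue
--         if line.startswith("#"):
--             continue
--         lines.append(line)
--     return _normalise_line(" ".join(lines))
-- ===== SOURCE B (Python) =====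
-- def _normalise_line(text: str) -> str:
--     compact = " ".join(text.split())
--     return compact.rstrip(".") + "." if compact else ""
--
-- def _first_non_heading_paragraph(content: str) -> str:
--     # Group the stripped lines into maximal runs of non-blank lines first,
--     # then pick the first run containing a non-heading line.
--     blocks = []
--     cur = []
--     for raw in content.splitlines():
--         line = raw.strip()
--         if line:
--             cur.append(line)
--         elif cur:
--             blocks.append(cur)
--             cur = []
--     if cur:
--         blocks.append(cur)
--     for block in blocks:
--         body = [l for l in block if not l.startswith("#")]
--         if body:
--             return _normalise_line(" ".join(body))
--     return _normalise_line("")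
-- ===== Notes on version B (the rewrite author's own statement) =====
-- stated objective: alternative
-- what changed: Replaces A's single accumulate-and-break loop with a two-phase decomposition: first group the stripped lines into maximal blocks of consecutive non-blank lines, then select the first block containing a non-heading line and join its non-heading lines.
import Mathlib
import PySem

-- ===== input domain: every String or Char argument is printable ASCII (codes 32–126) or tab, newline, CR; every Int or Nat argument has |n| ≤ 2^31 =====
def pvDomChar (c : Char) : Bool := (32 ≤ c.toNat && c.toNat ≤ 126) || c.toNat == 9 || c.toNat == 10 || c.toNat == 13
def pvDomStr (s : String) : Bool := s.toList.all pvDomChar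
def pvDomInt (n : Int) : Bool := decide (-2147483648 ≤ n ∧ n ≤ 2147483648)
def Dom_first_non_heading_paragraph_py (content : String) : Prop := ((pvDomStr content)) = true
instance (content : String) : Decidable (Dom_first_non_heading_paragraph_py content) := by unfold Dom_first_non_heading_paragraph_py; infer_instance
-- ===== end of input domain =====

-- B re-implements A by grouping the stripped lines into blocks first and then selecting
-- the first block containing a non-heading line (alternative decomposition, same cost).

-- shared module helper _normalise_line (used by both Pythons)
-- compact.rstrip(".") is ported by hand: drop all trailing '.' characters (exact for a
-- one-character strip set).
def pvNormaliseLine (text : String) : String :=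
  let compact := PySem.Str.join " " (PySem.Str.split₀ text)
  if compact = "" then ""
  else String.ofList ((compact.toList.reverse.dropWhile (fun c => c == '.')).reverse ++ ['.'])

-- ===== PORT A =====
def pvLoopA : List String → List String → List String
  | [], acc => acc
  | raw :: rest, acc =>
    let line := PySem.Str.strip raw
    if line = "" then
      (if acc = [] then pvLoopA rest acc else acc)
    else if PySem.Str.startswith line "#" = true then pvLoopA rest acc
    else pvLoopA rest (acc ++ [line])

def first_non_heading_paragraph_py (content : String) : String :=
  pvNormaliseLine (PySem.Str.join " " (pvLoopA (PySem.Str.splitlines content) []))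

-- ===== PORT B =====
def pvBlocks : List String → List String → List (List String)
  | cur, [] => if cur = [] then [] else [cur]
  | cur, raw :: rest =>
    let line := PySem.Str.strip raw
    if line ≠ "" then pvBlocks (cur ++ [line]) rest
    else if cur ≠ [] then cur :: pvBlocks [] rest
    else pvBlocks [] rest

def pvPickBody : List (List String) → Option (List String)
  | [] => none
  | b :: bs =>
    let body := b.filter (fun l => !(PySem.Str.startswith l "#"))
    if body = [] then pvPickBody bs else some body

def first_non_heading_paragraph_py_alt (content : String) : String :=
  match pvPickBody (pvBlocks [] (PySem.Str.splitlines content)) with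
  | some body => pvNormaliseLine (PySem.Str.join " " body)
  | none => pvNormaliseLine ""

-- ===== PRECONDITION & SPEC =====
def Spec_first_non_heading_paragraph_py (content : String) (out : String) : Prop := out = first_non_heading_paragraph_py_alt content
instance (content : String) (out : String) : Decidable (Spec_first_non_heading_paragraph_py content out) := by unfold Spec_first_non_heading_paragraph_py; infer_instance

-- ===== CLAIM (what is proved, stated in full; the proofs are below) =====
def Claim_equal_first_non_heading_paragraph_py : Prop := ∀ (content : String), Dom_first_non_heading_paragraph_py content → Spec_first_non_heading_paragraph_py content (first_non_heading_paragraph_py content)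

-- ===== LEMMAS AND PROOFS =====

-- A's accumulate-and-break loop equals "pick the first block with a non-heading line",
-- generalised over the current (not yet closed) block `cur`.
lemma pv_key (ls : List String) :
    ∀ cur : List String,
      pvLoopA ls (cur.filter (fun l => !(PySem.Str.startswith l "#")))
        = (pvPickBody (pvBlocks cur ls)).getD [] := by
  induction ls with
  | nil =>
    intro cur
    by_cases hc : cur = []
    · subst hc; rfl
    · simp only [pvLoopA, pvBlocks]
      rw [if_neg hc]
      simp only [pvPickBody]
      by_cases hf : cur.filter (fun l => !(PySem.Str.startswith l "#")) = []
      · rw [if_pos hf, hf]; rfl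
      · rw [if_neg hf]; rfl
  | cons raw rest ih =>
    intro cur
    simp only [pvLoopA, pvBlocks]
    by_cases hl : PySem.Str.strip raw = ""
    · rw [if_pos hl, if_neg (not_not_intro hl)]
      by_cases hc : cur = []
      · subst hc
        rw [if_neg (not_not_intro (rfl : ([] : List String) = []))]
        simp only [List.filter_nil, if_pos trivial]
        have h0 := ih []
        simpa only [List.filter_nil] using h0
      · rw [if_pos hc]
        simp only [pvPickBody]
        by_cases hf : cur.filter (fun l => !(PySem.Str.startswith l "#")) = []
        · rw [if_pos hf, if_pos hf, hf]
          have h0 := ih []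
          simpa only [List.filter_nil] using h0
        · rw [if_neg hf, if_neg hf, Option.getD_some]
    · rw [if_neg hl, if_pos hl]
      have hfilter :
          ∀ b : Bool, (!PySem.Str.startswith (PySem.Str.strip raw) "#") = b →
            (cur ++ [PySem.Str.strip raw]).filter (fun l => !(PySem.Str.startswith l "#"))
              = cur.filter (fun l => !(PySem.Str.startswith l "#"))
                  ++ (if b then [PySem.Str.strip raw] else []) := by
        intro b hb
        rw [List.filter_append]
        congr 1
        cases b <;> simp at hb <;> simp [List.filter_nil, hb]
      by_cases hh : PySem.Str.startswith (PySem.Str.strip raw) "#" = true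
      · rw [if_pos hh]
        have h0 := ih (cur ++ [PySem.Str.strip raw])
        rw [hfilter false (by rw [hh]; rfl)] at h0
        simpa only [if_neg (Bool.false_ne_true), List.append_nil] using h0
      · rw [if_neg hh]
        have h0 := ih (cur ++ [PySem.Str.strip raw])
        have hb : PySem.Str.startswith (PySem.Str.strip raw) "#" = false := Bool.eq_false_iff.mpr hh
        rw [hfilter true (by rw [hb]; rfl)] at h0
        simpa only [if_pos rfl] using h0

-- ===== VERDICT (by name: the statement is the Claim_ definition above) =====
theorem first_non_heading_paragraph_py_spec : Claim_equal_first_non_heading_paragraph_py := by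
  intro content _
  unfold Spec_first_non_heading_paragraph_py first_non_heading_paragraph_py
    first_non_heading_paragraph_py_alt
  have h := pv_key (PySem.Str.splitlines content) []
  simp only [List.filter_nil] at h
  rw [h]
  cases hp : pvPickBody (pvBlocks [] (PySem.Str.splitlines content)) with
  | none => simp [Option.getD]; rfl
  | some body => simp [Option.getD]
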